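-- pv_equiv track=rewrite | github.com/benquick123/code-profiling | code/batch-1/vse-naloge-brez-testov/DN7-Z-184.py | preberi_pot
-- ===== SOURCE A (Python) =====
-- def preberi_pot(ukazi):
--     """
--     Za podani seznam ukazov (glej navodila naloge) vrni pot.
--
--     Args:
--         ukazi (str): ukazi, napisani po vrsticah
--
--     Returns:
--         list of tuple of int: pot
--     """
--     seznamukazov = ukazi.split()
--     x=0
--     y=0
--     vx=0 #"hitrost" v smeri x
--     vy=-1 #"hitrost" v smeri y
--     pot = [(0,0)]
--     for i in seznamukazov:
--         if i == "DESNO":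
--             if abs(vy) == 1:
--                 vx = -vy
--                 vy=0
--             else:
--                 vy=vx
--                 vx=0
--         if i == "LEVO":
--             if abs(vy) == 1:
--                 vx = vy
--                 vy = 0
--             else:
--                 vy = -vx
--                 vx = 0
--         if i.isnumeric():
--             x = x + vx*int(i)
--             y = y + vy*int(i)
--             pot.append((x,y))
--     return pot
-- ===== SOURCE B (Python) =====
-- def preberi_pot(ukazi):
--     # Stage 1: turn the command stream into a list of displacement vectors.
--     # The heading of each move is the net turn count so far (DESNO minus LEVO), mod 4,
--     # read off a fixed direction table -- no mutable velocity state machine.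
--     dirs = [(0, -1), (1, 0), (0, 1), (-1, 0)]
--     deltas = []
--     turn = 0
--     for t in ukazi.split():
--         if t == "DESNO":
--             turn += 1
--         elif t == "LEVO":
--             turn -= 1
--         elif t.isnumeric():
--             n = int(t)
--             dx, dy = dirs[turn % 4]
--             deltas.append((dx * n, dy * n))
--     # Stage 2: the path is the running prefix sum of the displacements, from (0,0).
--     pot = [(0, 0)]
--     x = y = 0
--     for dx, dy in deltas:
--         x += dx
--         y += dy
--         pot.append((x, y))
--     return pot
-- ===== Notes on version B (the rewrite author's own statement) =====
-- stated objective: alternative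
-- what changed: B is staged: a first pass maps the token stream to a list of per-move displacement vectors using only a net-turn counter (DESNO minus LEVO, mod 4, read off a fixed table), then a second pass turns that displacement list into the path by prefix summation; A is a single pass mutating a velocity pair with four swap branches and accumulating positions directly.
import Mathlib
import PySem

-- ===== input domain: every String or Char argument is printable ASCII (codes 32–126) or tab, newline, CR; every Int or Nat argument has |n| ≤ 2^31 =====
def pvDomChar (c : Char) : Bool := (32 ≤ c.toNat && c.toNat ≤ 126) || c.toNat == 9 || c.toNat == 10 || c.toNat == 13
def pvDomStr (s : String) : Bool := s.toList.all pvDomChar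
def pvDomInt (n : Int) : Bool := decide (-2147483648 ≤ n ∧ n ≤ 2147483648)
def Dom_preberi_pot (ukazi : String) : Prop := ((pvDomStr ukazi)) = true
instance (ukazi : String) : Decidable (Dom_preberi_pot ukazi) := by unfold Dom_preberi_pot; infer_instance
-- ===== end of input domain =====

-- B replaces A's mutable velocity-pair single pass by two staged passes: tokens → displacement
-- vectors (net-turn counter mod 4 over a fixed table), then displacements → path by prefix sums.
-- `i.isnumeric()` is ported as PySem.Str.strIsdigit (exact on ASCII); `int(i)` as (PySem.Int.ofStr? i).getD 0
-- (exact here: the guard guarantees a digit string).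

-- ===== PORT A =====
def preberi_pot_stepA (st : Int × Int × Int × Int × List (Int × Int)) (i : String) :
    Int × Int × Int × Int × List (Int × Int) :=
  let x := st.1; let y := st.2.1; let vx := st.2.2.1; let vy := st.2.2.2.1; let pot := st.2.2.2.2
  let vx1 := if i == "DESNO" then (if vy.natAbs = 1 then -vy else 0) else vx
  let vy1 := if i == "DESNO" then (if vy.natAbs = 1 then 0 else vx) else vy
  let vx2 := if i == "LEVO" then (if vy1.natAbs = 1 then vy1 else 0) else vx1
  let vy2 := if i == "LEVO" then (if vy1.natAbs = 1 then 0 else -vx1) else vy1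
  if PySem.Str.strIsdigit i then
    let n := (PySem.Int.ofStr? i).getD 0
    (x + vx2 * n, y + vy2 * n, vx2, vy2, pot ++ [(x + vx2 * n, y + vy2 * n)])
  else (x, y, vx2, vy2, pot)

def preberi_pot (ukazi : String) : List (Int × Int) :=
  let st := (PySem.Str.split₀ ukazi).foldl preberi_pot_stepA
    ((0 : Int), (0 : Int), (0 : Int), (-1 : Int), [((0 : Int), (0 : Int))])
  st.2.2.2.2

-- ===== PORT B =====
def preberi_pot_dirs : List (Int × Int) := [(0, -1), (1, 0), (0, 1), (-1, 0)]

-- stage 1: token stream → displacement vectors, driven by the net turn count only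
def preberi_pot_stage1 (st : Int × List (Int × Int)) (t : String) : Int × List (Int × Int) :=
  let turn := st.1; let ds := st.2
  if t == "DESNO" then (turn + 1, ds)
  else if t == "LEVO" then (turn - 1, ds)
  else if PySem.Str.strIsdigit t then
    let n := (PySem.Int.ofStr? t).getD 0
    let v := preberi_pot_dirs.getD (PySem.Int.mod turn 4).toNat (0, 0)
    (turn, ds ++ [(v.1 * n, v.2 * n)])
  else (turn, ds)

-- stage 2: displacement list → path, by prefix summation from (0,0)
def preberi_pot_stage2 (st : Int × Int × List (Int × Int)) (d : Int × Int) :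
    Int × Int × List (Int × Int) :=
  (st.1 + d.1, st.2.1 + d.2, st.2.2 ++ [(st.1 + d.1, st.2.1 + d.2)])

def preberi_pot_alt (ukazi : String) : List (Int × Int) :=
  let ds := ((PySem.Str.split₀ ukazi).foldl preberi_pot_stage1 ((0 : Int), [])).2
  (ds.foldl preberi_pot_stage2 ((0 : Int), (0 : Int), [((0 : Int), (0 : Int))])).2.2

-- ===== PRECONDITION & SPEC =====
def Spec_preberi_pot (ukazi : String) (out : List (Int × Int)) : Prop := out = preberi_pot_alt ukazi
instance (ukazi : String) (out : List (Int × Int)) : Decidable (Spec_preberi_pot ukazi out) := by unfold Spec_preberi_pot; infer_instance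

-- ===== CLAIM (what is proved, stated in full; the proofs are below) =====
def Claim_equal_preberi_pot : Prop := ∀ (ukazi : String), Dom_preberi_pot ukazi → Spec_preberi_pot ukazi (preberi_pot ukazi)

-- ===== LEMMAS AND PROOFS =====

-- proof-side helpers
def pvDirA (turn : Int) : Int × Int := preberi_pot_dirs.getD (PySem.Int.mod turn 4).toNat (0, 0)

def pvDeltas : List String → Int → List (Int × Int)
  | [], _ => []
  | t :: ts, turn =>
    if t = "DESNO" then pvDeltas ts (turn + 1)
    else if t = "LEVO" then pvDeltas ts (turn - 1)
    else if PySem.Str.strIsdigit t then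
      let n := (PySem.Int.ofStr? t).getD 0
      ((pvDirA turn).1 * n, (pvDirA turn).2 * n) :: pvDeltas ts turn
    else pvDeltas ts turn

def pvPos : Int → Int → List (Int × Int) → List (Int × Int)
  | _, _, [] => []
  | x, y, (dx, dy) :: ds => (x + dx, y + dy) :: pvPos (x + dx) (y + dy) ds

theorem pv_mod4_lt (t : Int) : (PySem.Int.mod t 4).toNat < 4 := by
  have h := PySem.Int.mod_lt t (b := 4) (by omega)
  omega

theorem pv_modIdx_succ (t : Int) :
    (PySem.Int.mod (t + 1) 4).toNat = ((PySem.Int.mod t 4).toNat + 1) % 4 := by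
  rw [PySem.Int.mod_eq_emod_of_pos (by omega), PySem.Int.mod_eq_emod_of_pos (by omega)]
  omega

theorem pv_modIdx_pred (t : Int) :
    (PySem.Int.mod (t - 1) 4).toNat = ((PySem.Int.mod t 4).toNat + 3) % 4 := by
  rw [PySem.Int.mod_eq_emod_of_pos (by omega), PySem.Int.mod_eq_emod_of_pos (by omega)]
  omega

-- turning right/left moves the heading one slot along the table
theorem pv_dirA_right (turn : Int) :
    ((if (pvDirA turn).2.natAbs = 1 then -(pvDirA turn).2 else 0),
     (if (pvDirA turn).2.natAbs = 1 then 0 else (pvDirA turn).1)) = pvDirA (turn + 1) := by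
  have h := pv_mod4_lt turn
  unfold pvDirA
  rw [pv_modIdx_succ]
  set d := (PySem.Int.mod turn 4).toNat with hd
  interval_cases d <;> simp [preberi_pot_dirs]

theorem pv_dirA_left (turn : Int) :
    ((if (pvDirA turn).2.natAbs = 1 then (pvDirA turn).2 else 0),
     (if (pvDirA turn).2.natAbs = 1 then 0 else -(pvDirA turn).1)) = pvDirA (turn - 1) := by
  have h := pv_mod4_lt turn
  unfold pvDirA
  rw [pv_modIdx_pred]
  set d := (PySem.Int.mod turn 4).toNat with hd
  interval_cases d <;> simp [preberi_pot_dirs]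

-- stage 1 computes pvDeltas
theorem pv_stage1_eq (ts : List String) (turn : Int) (ds : List (Int × Int)) :
    (ts.foldl preberi_pot_stage1 (turn, ds)).2 = ds ++ pvDeltas ts turn := by
  induction ts generalizing turn ds with
  | nil => simp [pvDeltas]
  | cons t ts ih =>
    simp only [List.foldl_cons, preberi_pot_stage1, pvDeltas]
    by_cases h1 : t = "DESNO"
    · simp [h1, ih]
    · by_cases h2 : t = "LEVO"
      · simp [h2, ih]
      · by_cases h3 : PySem.Chars.strIsdigit t.toList = true
        · simp [h1, h2, h3, PySem.Str.strIsdigit, pvDirA, ih]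
        · simp [h1, h2, h3, PySem.Str.strIsdigit, ih]

-- stage 2 computes pvPos
theorem pv_stage2_eq (ds : List (Int × Int)) (x y : Int) (pot : List (Int × Int)) :
    (ds.foldl preberi_pot_stage2 (x, y, pot)).2.2 = pot ++ pvPos x y ds := by
  induction ds generalizing x y pot with
  | nil => simp [pvPos]
  | cons d ds ih =>
    obtain ⟨dx, dy⟩ := d
    simp [List.foldl_cons, preberi_pot_stage2, pvPos, ih]

-- A's fold, started with the heading pvDirA turn, produces pot ++ pvPos x y (pvDeltas ts turn)
theorem pv_foldA_eq (ts : List String) (x y turn : Int) (pot : List (Int × Int)) :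
    (ts.foldl preberi_pot_stepA (x, y, (pvDirA turn).1, (pvDirA turn).2, pot)).2.2.2.2
      = pot ++ pvPos x y (pvDeltas ts turn) := by
  induction ts generalizing x y turn pot with
  | nil => simp [pvDeltas, pvPos]
  | cons t ts ih =>
    simp only [List.foldl_cons, preberi_pot_stepA, pvDeltas]
    by_cases h1 : t = "DESNO"
    · have hr1 := congrArg Prod.fst (pv_dirA_right turn)
      have hr2 := congrArg Prod.snd (pv_dirA_right turn)
      simp only [] at hr1 hr2
      subst h1
      simp only [beq_iff_eq, if_neg (by decide : ("DESNO":String) ≠ "LEVO"),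
        reduceIte, hr1, hr2]
      rw [if_neg (by decide : ¬ PySem.Str.strIsdigit "DESNO" = true)]
      exact ih x y (turn + 1) pot
    · by_cases h2 : t = "LEVO"
      · have hl1 := congrArg Prod.fst (pv_dirA_left turn)
        have hl2 := congrArg Prod.snd (pv_dirA_left turn)
        simp only [] at hl1 hl2
        subst h2
        simp only [beq_iff_eq, if_neg h1, reduceIte, hl1, hl2]
        rw [if_neg (by decide : ¬ PySem.Str.strIsdigit "LEVO" = true)]
        exact ih x y (turn - 1) pot
      · by_cases h3 : PySem.Str.strIsdigit t = true
        · simp only [beq_iff_eq, if_neg h1, if_neg h2, if_pos h3]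
          rw [ih _ _ turn, pvPos, List.append_assoc]
          rfl
        · simp only [beq_iff_eq, if_neg h1, if_neg h2, if_neg h3]
          exact ih x y turn pot

-- ===== VERDICT (by name: the statement is the Claim_ definition above) =====
theorem preberi_pot_spec : Claim_equal_preberi_pot := by
  intro ukazi _
  unfold Spec_preberi_pot preberi_pot preberi_pot_alt
  have h0 : pvDirA 0 = ((0 : Int), (-1 : Int)) := by decide
  rw [pv_stage1_eq _ 0 [], pv_stage2_eq, List.nil_append]
  rw [show ((0:Int),(0:Int),(0:Int),(-1:Int),[((0:Int),(0:Int))])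
        = ((0:Int),(0:Int),(pvDirA 0).1,(pvDirA 0).2,[((0:Int),(0:Int))]) from by rw [h0]]
  exact pv_foldA_eq _ 0 0 0 _
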